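-- pv_equiv track=rewrite | github.com/Sedona-Rajesh/Mini_Project_S6 | eeg_dss/prediction/predictor.py | _region_indices
-- ===== SOURCE A (Python) =====
-- def _region_indices(channels_upper: list[str]) -> dict[str, list[int]]:
--     idx = {
--         "frontal": [],
--         "temporal": [],
--         "central": [],
--         "parietal": [],
--         "occipital": [],
--         "posterior": [],
--     }
--     for i, ch in enumerate(channels_upper):
--         if ch.startswith(("FP", "AF", "F")):
--             idx["frontal"].append(i)
--         if ch.startswith("T"):
--             idx["temporal"].append(i)
--         if ch.startswith("C"):
--             idx["central"].append(i)
--         if ch.startswith("P"):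
--             idx["parietal"].append(i)
--             idx["posterior"].append(i)
--         if ch.startswith("O"):
--             idx["occipital"].append(i)
--             idx["posterior"].append(i)
--     return idx
-- ===== SOURCE B (Python) =====
-- def _region_indices(channels_upper: list[str]) -> dict[str, list[int]]:
--     def pick(*prefixes):
--         return [i for i, ch in enumerate(channels_upper) if ch.startswith(prefixes)]
--     return {
--         "frontal": pick("FP", "AF", "F"),
--         "temporal": pick("T"),
--         "central": pick("C"),
--         "parietal": pick("P"),
--         "occipital": pick("O"),
--         "posterior": pick("P", "O"),
--     }
-- ===== Notes on version B (the rewrite author's own statement) =====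
-- stated objective: alternative
-- what changed: Replaced A's single dispatch loop that appends into six dict buckets by a region-centric computation: each region's index list is built by its own comprehension over the enumerated channels filtering on that region's prefixes, posterior by one such filter over its two prefixes instead of interleaved appends from two branches.
import Mathlib
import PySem

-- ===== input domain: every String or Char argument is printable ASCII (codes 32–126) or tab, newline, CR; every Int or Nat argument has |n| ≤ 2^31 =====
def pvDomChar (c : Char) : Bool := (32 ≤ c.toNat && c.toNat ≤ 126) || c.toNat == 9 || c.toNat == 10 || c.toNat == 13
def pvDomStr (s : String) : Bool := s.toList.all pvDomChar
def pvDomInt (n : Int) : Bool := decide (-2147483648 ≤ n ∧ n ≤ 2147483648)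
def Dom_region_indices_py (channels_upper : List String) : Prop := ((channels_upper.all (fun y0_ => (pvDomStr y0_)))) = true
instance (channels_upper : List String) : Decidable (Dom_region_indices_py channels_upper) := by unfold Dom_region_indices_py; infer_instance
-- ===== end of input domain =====

-- B is a region-centric rewrite: per-region filters over the enumerated channels instead of A's single dispatch loop into six buckets (alternative decomposition, same cost).


-- ===== PORT A =====
-- A's dict has six fixed distinct keys; it is ported as a 6-tuple state threaded through
-- the single enumerate loop, and rebuilt as an assoc list in insertion order at the end.
def regA_step (st : List Int × List Int × List Int × List Int × List Int × List Int)
    (p : Int × String) : List Int × List Int × List Int × List Int × List Int × List Int :=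
  let (f, t, c, pa, o, po) := st
  let i := p.1
  let ch := p.2
  let f := if PySem.Str.startswith ch "FP" || PySem.Str.startswith ch "AF" || PySem.Str.startswith ch "F" then f ++ [i] else f
  let t := if PySem.Str.startswith ch "T" then t ++ [i] else t
  let c := if PySem.Str.startswith ch "C" then c ++ [i] else c
  let (pa, po) := if PySem.Str.startswith ch "P" then (pa ++ [i], po ++ [i]) else (pa, po)
  let (o, po) := if PySem.Str.startswith ch "O" then (o ++ [i], po ++ [i]) else (o, po)
  (f, t, c, pa, o, po)

def region_indices_py (channels_upper : List String) : List (String × List Int) :=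
  let st := (PySem.List.enumerate channels_upper 0).foldl regA_step ([], [], [], [], [], [])
  [("frontal", st.1), ("temporal", st.2.1), ("central", st.2.2.1),
   ("parietal", st.2.2.2.1), ("occipital", st.2.2.2.2.1), ("posterior", st.2.2.2.2.2)]

-- ===== PORT B =====
-- pick(*prefixes): one comprehension over enumerate filtering on the region's prefixes.
def pickB (channels_upper : List String) (prefixes : List String) : List Int :=
  (((PySem.List.enumerate channels_upper 0).filter
      (fun p => prefixes.any (fun q => PySem.Str.startswith p.2 q))).map (·.1))

def region_indices_py_alt (channels_upper : List String) : List (String × List Int) :=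
  [("frontal", pickB channels_upper ["FP", "AF", "F"]),
   ("temporal", pickB channels_upper ["T"]),
   ("central", pickB channels_upper ["C"]),
   ("parietal", pickB channels_upper ["P"]),
   ("occipital", pickB channels_upper ["O"]),
   ("posterior", pickB channels_upper ["P", "O"])]

-- ===== PRECONDITION & SPEC =====
def Spec_region_indices_py (channels_upper : List String) (out : List (String × List Int)) : Prop := out = region_indices_py_alt channels_upper
instance (channels_upper : List String) (out : List (String × List Int)) : Decidable (Spec_region_indices_py channels_upper out) := by unfold Spec_region_indices_py; infer_instance

-- ===== CLAIM (what is proved, stated in full; the proofs are below) =====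
def Claim_equal_region_indices_py : Prop := ∀ (channels_upper : List String), Dom_region_indices_py channels_upper → Spec_region_indices_py channels_upper (region_indices_py channels_upper)

-- ===== LEMMAS AND PROOFS =====

-- a string cannot start with both "P" and "O"
lemma not_P_and_O (ch : String) :
    ¬ (PySem.Str.startswith ch "P" = true ∧ PySem.Str.startswith ch "O" = true) := by
  rintro ⟨hP, hO⟩
  simp only [PySem.Str.startswith_eq, PySem.Chars.startswith_iff] at hP hO
  have hPl : "P".toList = ['P'] := by decide
  have hOl : "O".toList = ['O'] := by decide
  rw [hPl] at hP; rw [hOl] at hO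
  rcases hP with ⟨u, hu⟩
  rcases hO with ⟨v, hv⟩
  rw [← hv] at hu
  simp at hu

def selB (l : List (Int × String)) (prefixes : List String) : List Int :=
  ((l.filter (fun p => prefixes.any (fun q => PySem.Str.startswith p.2 q))).map (·.1))

lemma selB_cons (hd : Int × String) (tl : List (Int × String)) (pre : List String) :
    selB (hd :: tl) pre =
      (if pre.any (fun q => PySem.Str.startswith hd.2 q) then [hd.1] else []) ++ selB tl pre := by
  simp only [selB, List.filter_cons]
  split_ifs <;> simp_all

lemma regA_step_eq (st : List Int × List Int × List Int × List Int × List Int × List Int)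
    (p : Int × String) :
    regA_step st p =
      (st.1 ++ (if PySem.Str.startswith p.2 "FP" || PySem.Str.startswith p.2 "AF" || PySem.Str.startswith p.2 "F" then [p.1] else []),
       st.2.1 ++ (if PySem.Str.startswith p.2 "T" then [p.1] else []),
       st.2.2.1 ++ (if PySem.Str.startswith p.2 "C" then [p.1] else []),
       st.2.2.2.1 ++ (if PySem.Str.startswith p.2 "P" then [p.1] else []),
       st.2.2.2.2.1 ++ (if PySem.Str.startswith p.2 "O" then [p.1] else []),
       st.2.2.2.2.2 ++ (if PySem.Str.startswith p.2 "P" || PySem.Str.startswith p.2 "O" then [p.1] else [])) := by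
  obtain ⟨f, t, c, pa, o, po⟩ := st
  by_cases hP : PySem.Str.startswith p.2 "P" = true <;>
    by_cases hO : PySem.Str.startswith p.2 "O" = true
  · exact absurd ⟨hP, hO⟩ (not_P_and_O p.2)
  all_goals
    simp only [Bool.not_eq_true] at *
    simp only [regA_step, hP, hO]
    split_ifs <;> simp_all
lemma foldA_eq (l : List (Int × String)) (f t c pa o po : List Int) :
    l.foldl regA_step (f, t, c, pa, o, po) =
      (f ++ selB l ["FP", "AF", "F"], t ++ selB l ["T"], c ++ selB l ["C"],
       pa ++ selB l ["P"], o ++ selB l ["O"], po ++ selB l ["P", "O"]) := by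
  induction l generalizing f t c pa o po with
  | nil => simp [selB]
  | cons hd tl ih =>
    rw [List.foldl_cons, regA_step_eq, ih]
    simp only [selB_cons, List.any_cons, List.any_nil, Bool.or_false, Bool.or_assoc,
      List.append_assoc]

-- ===== VERDICT (by name: the statement is the Claim_ definition above) =====
theorem region_indices_py_spec : Claim_equal_region_indices_py := by
  intro channels_upper _
  show region_indices_py channels_upper = region_indices_py_alt channels_upper
  simp [region_indices_py, region_indices_py_alt, foldA_eq, pickB, selB]
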